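-- pv_equiv track=rewrite | github.com/Long-Brian-Yang/vasp_script | fast_vasp_script/test2_add_potcar.py | select_potcar_type
-- ===== SOURCE A (Python) =====
-- def select_potcar_type(element, available_types, preferred_types=None):
--     """Select POTCAR type based on priority"""
--     if not available_types:
--         return None
--
--     if preferred_types and element in preferred_types:
--         if preferred_types[element] in available_types:
--             return preferred_types[element]
--
--     # Priority order
--     priority_suffixes = [
--         '_pv',         # With p valence electrons
--         '_sv',         # With semi-core valence electrons
--         '',           # Standard version
--         '_GW',        # GW version
--         '_sv_GW',     # GW with semi-core valence electrons
--         '_h',         # Hard version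
--         '_s'          # Soft version
--     ]
--
--     # Search by priority
--     for suffix in priority_suffixes:
--         for pot_type in available_types:
--             # Check if it matches the current priority
--             if pot_type == f"{element}{suffix}":
--                 return pot_type
--
--     # If no preferred type is found, return the first available type
--     return available_types[0]
-- ===== SOURCE B (Python) =====
-- def select_potcar_type(element, available_types, preferred_types=None):
--     """Select POTCAR type based on priority (rank table + single scan)."""
--     if not available_types:
--         return None
--
--     if preferred_types and element in preferred_types:
--         if preferred_types[element] in available_types:
--             return preferred_types[element]
--
--     priority_suffixes = ['_pv', '_sv', '', '_GW', '_sv_GW', '_h', '_s']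
--     rank = {f"{element}{suffix}": i for i, suffix in enumerate(priority_suffixes)}
--     n = len(priority_suffixes)
--     best = n
--     for pot_type in available_types:
--         r = rank.get(pot_type)
--         if r is not None and r < best:
--             best = r
--     if best < n:
--         return f"{element}{priority_suffixes[best]}"
--     return available_types[0]
-- ===== Notes on version B (the rewrite author's own statement) =====
-- stated objective: faster
-- what changed: Replaces the nested priority-suffix x available-types search with a precomputed rank table (candidate string -> priority index) and a single min-rank pass over available_types, reconstructing the winner from the best rank.
import Mathlib
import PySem

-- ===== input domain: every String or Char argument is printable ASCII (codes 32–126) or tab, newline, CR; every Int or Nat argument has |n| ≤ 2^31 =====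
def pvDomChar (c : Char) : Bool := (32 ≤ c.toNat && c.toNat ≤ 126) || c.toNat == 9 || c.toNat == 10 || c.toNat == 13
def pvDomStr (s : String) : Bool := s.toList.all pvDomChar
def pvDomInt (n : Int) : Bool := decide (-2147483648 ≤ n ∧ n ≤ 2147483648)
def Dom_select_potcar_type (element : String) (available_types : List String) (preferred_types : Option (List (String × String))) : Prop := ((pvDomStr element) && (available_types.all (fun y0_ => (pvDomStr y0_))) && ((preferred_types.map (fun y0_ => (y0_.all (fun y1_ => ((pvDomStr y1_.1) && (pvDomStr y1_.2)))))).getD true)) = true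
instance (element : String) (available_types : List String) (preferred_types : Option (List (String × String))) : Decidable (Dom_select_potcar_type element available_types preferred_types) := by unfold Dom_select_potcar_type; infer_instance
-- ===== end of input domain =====

-- B replaces A's nested priority×available search by a rank table plus one min-rank scan; same results, alternative algorithm.

-- The fixed priority order, shared verbatim by both Python sources
def pvSuffixes : List String := ["_pv", "_sv", "", "_GW", "_sv_GW", "_h", "_s"]

-- shared by both sources verbatim: the preferred_types shortcut
-- 'if preferred_types and element in preferred_types: if preferred_types[element] in available_types: return it'
def pvPrefLookup (preferred_types : Option (List (String × String))) (element : String) (avail : List String) : Option String :=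
  match preferred_types with
  | none => none
  | some d =>
    if d.isEmpty then none
    else
      match (PySem.Dict.mk d).get? element with
      | none => none
      | some v => if avail.contains v then some v else none

-- ===== PORT A =====
-- inner loop: 'for pot_type in available_types: if pot_type == cand: return pot_type'
def pvInnerA (cand : String) : List String → Option String
  | [] => none
  | pot :: rest => if pot == cand then some pot else pvInnerA cand rest

-- outer loop: 'for suffix in priority_suffixes: …'
def pvSearchA (element : String) (avail : List String) : List String → Option String
  | [] => none
  | s :: rest =>
    match pvInnerA (element ++ s) avail with
    | some pot => some pot
    | none => pvSearchA element avail rest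

def select_potcar_type (element : String) (available_types : List String) (preferred_types : Option (List (String × String))) : Option String :=
  if available_types.isEmpty then none
  else
    match pvPrefLookup preferred_types element available_types with
    | some v => some v
    | none =>
      match pvSearchA element available_types pvSuffixes with
      | some pot => some pot
      | none => available_types[0]?

-- ===== PORT B =====
-- rank = {element+suffix: i for i, suffix in enumerate(priority_suffixes)}
def pvRank (element : String) : PySem.Dict String Int :=
  (PySem.List.enumerate pvSuffixes).foldl (fun d p => d.insert (element ++ p.2) p.1) PySem.Dict.empty

def select_potcar_type_alt (element : String) (available_types : List String) (preferred_types : Option (List (String × String))) : Option String :=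
  if available_types.isEmpty then none
  else
    match pvPrefLookup preferred_types element available_types with
    | some v => some v
    | none =>
      let rank := pvRank element
      let n : Int := (pvSuffixes.length : Int)
      let best : Int := available_types.foldl (fun b pot =>
        match rank.get? pot with
        | some r => if r < b then r else b
        | none => b) n
      if best < n then
        match PySem.List.pyGet? pvSuffixes best with
        | some s => some (element ++ s)
        | none => none
      else available_types[0]?

-- ===== PRECONDITION & SPEC =====
def Spec_select_potcar_type (element : String) (available_types : List String) (preferred_types : Option (List (String × String))) (out : Option String) : Prop := out = select_potcar_type_alt element available_types preferred_types
instance (element : String) (available_types : List String) (preferred_types : Option (List (String × String))) (out : Option String) : Decidable (Spec_select_potcar_type element available_types preferred_types out) := by unfold Spec_select_potcar_type; infer_instance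

-- ===== CLAIM (what is proved, stated in full; the proofs are below) =====
def Claim_equal_select_potcar_type : Prop := ∀ (element : String) (available_types : List String) (preferred_types : Option (List (String × String))), Dom_select_potcar_type element available_types preferred_types → Spec_select_potcar_type element available_types preferred_types (select_potcar_type element available_types preferred_types)

-- ===== LEMMAS AND PROOFS =====

-- first-match index lookup in a candidate list, starting at offset k
def pvIdxFrom (cs : List String) (k : Int) (pot : String) : Option Int :=
  match cs with
  | [] => none
  | c :: rest => if c == pot then some k else pvIdxFrom rest (k + 1) pot

theorem pvInnerA_eq (cand : String) (avail : List String) :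
    pvInnerA cand avail = if avail.contains cand then some cand else none := by
  induction avail with
  | nil => simp [pvInnerA]
  | cons pot rest ih =>
    by_cases h : pot = cand
    · simp [pvInnerA, h]
    · have h' : ¬cand = pot := fun hh => h hh.symm
      simp [pvInnerA, h, h', ih, beq_iff_eq]

theorem pvSearchA_eq (element : String) (avail : List String) (ss : List String) :
    pvSearchA element avail ss
      = (ss.map (fun s => element ++ s)).find? (fun c => avail.contains c) := by
  induction ss with
  | nil => simp [pvSearchA]
  | cons s rest ih =>
    rw [pvSearchA, pvInnerA_eq, List.map_cons]
    cases h : avail.contains (element ++ s)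
    · rw [if_neg (by simpa using h), List.find?_cons_of_neg (by simpa using h), ih]
    · rw [if_pos (by simpa using h), List.find?_cons_of_pos (by simpa using h)]

theorem pvIdxFrom_some (cs : List String) (k : Int) (pot : String) (i : Int)
    (h : pvIdxFrom cs k pot = some i) :
    ∃ j : Nat, ∃ hj : j < cs.length, i = k + j ∧ cs[j] = pot := by
  induction cs generalizing k with
  | nil => simp [pvIdxFrom] at h
  | cons c rest ih =>
    rw [pvIdxFrom] at h
    by_cases hc : c = pot
    · simp [hc] at h
      exact ⟨0, by simp, by omega, by simp [hc]⟩
    · simp [hc] at h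
      obtain ⟨j, hj, hi, hg⟩ := ih (k + 1) h
      exact ⟨j + 1, by simpa using Nat.succ_lt_succ hj, by omega, by simpa using hg⟩

theorem pvIdxFrom_getElem (cs : List String) (hn : cs.Nodup) (k : Int) (j : Nat) (hj : j < cs.length) :
    pvIdxFrom cs k cs[j] = some (k + j) := by
  induction cs generalizing k j with
  | nil => simp at hj
  | cons c rest ih =>
    cases j with
    | zero => simp [pvIdxFrom]
    | succ j' =>
      have hj' : j' < rest.length := by simpa using Nat.lt_of_succ_lt_succ hj
      have hmem : rest[j'] ∈ rest := List.getElem_mem hj'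
      have hne : c ≠ rest[j'] := by
        intro h; exact (List.nodup_cons.mp hn).1 (h ▸ hmem)
      have : (c :: rest)[j' + 1] = rest[j'] := by simp
      rw [this, pvIdxFrom, if_neg (by simpa using hne)]
      rw [ih (List.nodup_cons.mp hn).2 (k + 1) j' hj']
      congr 1
      push_cast
      omega

-- the fold computes a running minimum
def pvStep (L : String → Option Int) (b : Int) (pot : String) : Int :=
  match L pot with
  | some r => if r < b then r else b
  | none => b

theorem pvStep_le (L : String → Option Int) (b : Int) (pot : String) : pvStep L b pot ≤ b := by
  unfold pvStep
  cases L pot with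
  | none => simp
  | some r => dsimp; split <;> omega

theorem pvFold_le (L : String → Option Int) (avail : List String) (b : Int) :
    avail.foldl (pvStep L) b ≤ b := by
  induction avail generalizing b with
  | nil => simp
  | cons p rest ih =>
    calc rest.foldl (pvStep L) (pvStep L b p) ≤ pvStep L b p := ih _
      _ ≤ b := pvStep_le L b p

theorem pvFold_cases (L : String → Option Int) (avail : List String) (b : Int) :
    avail.foldl (pvStep L) b = b ∨ ∃ pot ∈ avail, L pot = some (avail.foldl (pvStep L) b) := by
  induction avail generalizing b with
  | nil => simp
  | cons p rest ih =>
    rcases ih (pvStep L b p) with h | ⟨pot, hm, hL⟩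
    · rw [List.foldl_cons, h]
      unfold pvStep
      cases hp : L p with
      | none => simp
      | some r =>
        dsimp
        split
        · exact Or.inr ⟨p, by simp, hp⟩
        · simp
    · exact Or.inr ⟨pot, by simp [hm], hL⟩

theorem pvFold_min (L : String → Option Int) (avail : List String) (b : Int)
    (pot : String) (hm : pot ∈ avail) (r : Int) (hL : L pot = some r) :
    avail.foldl (pvStep L) b ≤ r := by
  induction avail generalizing b with
  | nil => simp at hm
  | cons p rest ih =>
    rw [List.foldl_cons]
    rcases List.mem_cons.mp hm with h | h
    · subst h
      have h1 : pvStep L b pot ≤ r := by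
        unfold pvStep; rw [hL]; dsimp; split <;> omega
      calc rest.foldl (pvStep L) (pvStep L b pot) ≤ pvStep L b pot := pvFold_le _ _ _
        _ ≤ r := h1
    · exact ih (pvStep L b p) h

-- candidate strings are pairwise distinct
theorem pvCands_nodup (element : String) : (pvSuffixes.map (fun s => element ++ s)).Nodup := by
  have hnd : pvSuffixes.Nodup := by decide
  refine hnd.map_on ?_
  intro a _ b _ h
  have h2 : element.toList ++ a.toList = element.toList ++ b.toList := by
    simpa [String.toList_append] using congrArg String.toList h
  exact String.toList_injective (List.append_cancel_left h2)

theorem pvRank_get? (element : String) (pot : String) :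
    (pvRank element).get? pot = pvIdxFrom (pvSuffixes.map (fun s => element ++ s)) 0 pot := by
  have hmapk : List.map (fun p : Int × String => element ++ p.2) (PySem.List.enumerate pvSuffixes)
      = pvSuffixes.map (fun s => element ++ s) := by
    rw [show (fun p : Int × String => element ++ p.2)
        = (fun s => element ++ s) ∘ (fun p : Int × String => p.2) from rfl,
      ← List.map_map, PySem.List.map_snd_enumerate]
  have hk : (List.map (fun p : Int × String => element ++ p.2) (PySem.List.enumerate pvSuffixes)).Nodup := by
    rw [hmapk]; exact pvCands_nodup element
  have hmk : pvRank element
      = PySem.Dict.mk ((PySem.List.enumerate pvSuffixes).map (fun p => (element ++ p.2, p.1))) := by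
    apply PySem.Dict.ext
    rw [pvRank, PySem.Dict.items_foldl_insert_fresh _ _ _ _ (fun a _ => PySem.Dict.contains_empty _) hk]
    rfl
  rw [hmk,
    show PySem.List.enumerate pvSuffixes
      = [((0:Int),"_pv"),(1,"_sv"),(2,""),(3,"_GW"),(4,"_sv_GW"),(5,"_h"),(6,"_s")] from rfl]
  simp only [List.map_cons, List.map_nil, PySem.Dict.get?_mk_cons, pvSuffixes, pvIdxFrom]
  norm_num [show ({ items := [] } : PySem.Dict String Int).get? pot = none from rfl]

theorem pvFind?_first (cs : List String) (p : String → Bool) (j : Nat) (hj : j < cs.length)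
    (hp : p cs[j] = true) (hmin : ∀ i (hi : i < j), p (cs[i]'(Nat.lt_trans hi hj)) = false) :
    cs.find? p = some cs[j] := by
  induction cs generalizing j with
  | nil => simp at hj
  | cons c rest ih =>
    cases j with
    | zero => exact List.find?_cons_of_pos (by simpa using hp)
    | succ j' =>
      have h0 : p c = false := hmin 0 (Nat.succ_pos j')
      have hj' : j' < rest.length := by simpa using Nat.lt_of_succ_lt_succ hj
      rw [List.find?_cons_of_neg (by simp [h0])]
      simpa using ih j' hj' (by simpa using hp)
        (fun i hi => by simpa using hmin (i + 1) (Nat.succ_lt_succ hi))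

theorem pvCore (element : String) (avail : List String) :
    (match pvSearchA element avail pvSuffixes with
     | some pot => some pot
     | none => avail[0]?) =
    (let rank := pvRank element
     let n : Int := (pvSuffixes.length : Int)
     let best : Int := avail.foldl (fun b pot =>
        match rank.get? pot with
        | some r => if r < b then r else b
        | none => b) n
     if best < n then
       match PySem.List.pyGet? pvSuffixes best with
       | some s => some (element ++ s)
       | none => none
     else avail[0]?) := by
  have hnd : (pvSuffixes.map (fun s => element ++ s)).Nodup := pvCands_nodup element
  have hclen : (pvSuffixes.map (fun s => element ++ s)).length = 7 := by simp [pvSuffixes]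
  have hfun : (fun (b : Int) pot =>
      match (pvRank element).get? pot with
      | some r => if r < b then r else b
      | none => b)
      = pvStep (pvIdxFrom (pvSuffixes.map (fun s => element ++ s)) 0) := by
    funext b pot
    rw [pvStep, pvRank_get?]
  have hn : (pvSuffixes.length : Int) = 7 := by norm_num [pvSuffixes]
  dsimp only
  rw [hfun, hn, pvSearchA_eq]
  have hle := pvFold_le (pvIdxFrom (pvSuffixes.map (fun s => element ++ s)) 0) avail 7
  by_cases hlt : avail.foldl (pvStep (pvIdxFrom (pvSuffixes.map (fun s => element ++ s)) 0)) 7 < 7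
  · rcases pvFold_cases (pvIdxFrom (pvSuffixes.map (fun s => element ++ s)) 0) avail 7
      with hm7 | ⟨pot, hmem, hLpot⟩
    · omega
    · obtain ⟨j, hj, hij, hgj⟩ := pvIdxFrom_some _ _ _ _ hLpot
      have hpj : ((pvSuffixes.map (fun s => element ++ s))[j]'hj) ∈ avail := hgj ▸ hmem
      have hmin : ∀ i (hi : i < j),
          (fun c => avail.contains c) ((pvSuffixes.map (fun s => element ++ s))[i]'(Nat.lt_trans hi hj)) = false := by
        intro i hi
        by_contra hc
        have hmemi : ((pvSuffixes.map (fun s => element ++ s))[i]'(Nat.lt_trans hi hj)) ∈ avail := by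
          simpa using Bool.of_not_eq_false hc
        have hLi := pvIdxFrom_getElem _ hnd 0 i (Nat.lt_trans hi hj)
        have := pvFold_min _ avail 7 _ hmemi _ hLi
        omega
      rw [pvFind?_first _ _ j hj (by simpa using hpj) hmin, if_pos hlt]
      have hjm : avail.foldl (pvStep (pvIdxFrom (pvSuffixes.map (fun s => element ++ s)) 0)) 7 = ((j : Nat) : Int) := by omega
      rw [hjm, PySem.List.pyGet?_natCast]
      have hjlen : j < pvSuffixes.length := by
        simpa using hj
      rw [List.getElem?_eq_getElem hjlen]
      simp
  · rw [if_neg hlt]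
    have hnone : (pvSuffixes.map (fun s => element ++ s)).find? (fun c => avail.contains c) = none := by
      rw [List.find?_eq_none]
      intro c hc hcontains
      obtain ⟨j, hj, rfl⟩ := List.mem_iff_getElem.mp hc
      have hLj := pvIdxFrom_getElem _ hnd 0 j hj
      have hmemj : ((pvSuffixes.map (fun s => element ++ s))[j]'hj) ∈ avail := by simpa using hcontains
      have := pvFold_min _ avail 7 _ hmemj _ hLj
      omega
    rw [hnone]

-- ===== VERDICT (by name: the statement is the Claim_ definition above) =====
theorem select_potcar_type_spec : Claim_equal_select_potcar_type := by
  intro element avail pref _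
  unfold Spec_select_potcar_type select_potcar_type select_potcar_type_alt
  by_cases he : avail.isEmpty
  · rw [if_pos he, if_pos he]
  · rw [if_neg he, if_neg he]
    cases hp : pvPrefLookup pref element avail with
    | some v => rfl
    | none => exact pvCore element avail
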